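-- pv_equiv track=rewrite | github.com/FreeScienceCommunity/radtrack | radtrack/RbUtility.py | minmaxN
-- ===== SOURCE A (Python) =====
-- def minmaxN(stack, wantMax):
--     N = stack.pop(-1)
--     lst = []
--     for loop in range(N):
--         lst.append(stack.pop())
--     if wantMax:
--         return max(lst)
--     else:
--         return min(lst)
-- ===== SOURCE B (Python) =====
-- def minmaxN(stack, wantMax):
--     N = stack.pop(-1)
--     best = stack.pop()
--     for _ in range(N - 1):
--         v = stack.pop()
--         if (v > best) if wantMax else (v < best):
--             best = v
--     return best
-- ===== Notes on version B (the rewrite author's own statement) =====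
-- stated objective: alternative
-- what changed: B threads a running best through the pop loop (strict > / < keeping the first extremal) instead of collecting the popped elements into a list and calling max/min on it.
import Mathlib
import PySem

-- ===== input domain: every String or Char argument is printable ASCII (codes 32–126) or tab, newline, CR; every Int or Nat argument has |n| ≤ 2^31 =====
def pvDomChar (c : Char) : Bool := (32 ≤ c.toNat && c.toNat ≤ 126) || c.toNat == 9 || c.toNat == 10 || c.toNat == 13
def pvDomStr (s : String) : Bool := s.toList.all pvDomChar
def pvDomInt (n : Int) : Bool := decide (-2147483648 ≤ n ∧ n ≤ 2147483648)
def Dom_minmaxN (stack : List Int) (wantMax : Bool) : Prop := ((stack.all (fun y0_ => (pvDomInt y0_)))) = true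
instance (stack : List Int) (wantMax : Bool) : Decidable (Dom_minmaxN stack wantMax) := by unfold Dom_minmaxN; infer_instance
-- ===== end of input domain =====

-- B replaces A's collect-then-max/min with a running best threaded through the pop loop; same cost.
-- Both Pythons mutate `stack` in place (the same N+1 pops); the equivalence proved here is about the return value.
-- ===== PORT A =====
-- the loop 'for loop in range(N): lst.append(stack.pop())' (k = remaining iterations; a failing pop = IndexError, excluded by Pre_)
def pvLoopA : Nat → List Int → List Int → List Int
  | 0, _, lst => lst
  | k+1, st, lst =>
    match PySem.List.pop? st with
    | some (v, st') => pvLoopA k st' (lst ++ [v])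
    | none => lst

def minmaxN (stack : List Int) (wantMax : Bool) : Int :=
  match PySem.List.pop? stack with
  | none => 0  -- IndexError on empty stack, excluded by Pre_
  | some (n, st) =>
    let lst := pvLoopA n.toNat st []
    if wantMax then (PySem.List.max? lst (fun x => x)).getD 0  -- none = ValueError max([]), excluded by Pre_
    else (PySem.List.min? lst (fun x => x)).getD 0

-- ===== PORT B =====
-- the loop 'for _ in range(N-1): v = stack.pop(); if …: best = v'
def pvLoopB : Nat → List Int → Bool → Int → Int
  | 0, _, _, best => best
  | k+1, st, wm, best =>
    match PySem.List.pop? st with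
    | some (v, st') => pvLoopB k st' wm (if (if wm then best < v else v < best) then v else best)
    | none => best

def minmaxN_alt (stack : List Int) (wantMax : Bool) : Int :=
  match PySem.List.pop? stack with
  | none => 0  -- IndexError, excluded by Pre_
  | some (n, st) =>
    match PySem.List.pop? st with
    | none => 0  -- IndexError, excluded by Pre_
    | some (best, st') => pvLoopB (n - 1).toNat st' wantMax best

-- ===== PRECONDITION & SPEC =====
-- Exactly the inputs on which the Python A returns: a non-empty stack whose last element N
-- satisfies 1 ≤ N ≤ len(stack) - 1 (N ≤ 0 → ValueError from max([])/min([]); N too large or empty stack → IndexError).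
def Pre_minmaxN (stack : List Int) (wantMax : Bool) : Prop :=
  stack ≠ [] ∧ 1 ≤ stack.getLastD 0 ∧ stack.getLastD 0 ≤ (stack.length : Int) - 1
instance (stack : List Int) (wantMax : Bool) : Decidable (Pre_minmaxN stack wantMax) := by unfold Pre_minmaxN; infer_instance
def pvWitness_minmaxN : List Int × Bool := ([5, 3, 7, 2], true)
def Spec_minmaxN (stack : List Int) (wantMax : Bool) (out : Int) : Prop := out = minmaxN_alt stack wantMax
instance (stack : List Int) (wantMax : Bool) (out : Int) : Decidable (Spec_minmaxN stack wantMax out) := by unfold Spec_minmaxN; infer_instance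

-- ===== CLAIM (what is proved, stated in full; the proofs are below) =====
def Claim_equal_minmaxN : Prop := ∀ (stack : List Int) (wantMax : Bool), Dom_minmaxN stack wantMax → Pre_minmaxN stack wantMax → Spec_minmaxN stack wantMax (minmaxN stack wantMax)

-- ===== LEMMAS AND PROOFS =====

-- A's loop, read on the reversed remaining stack: it collects the first k elements of r.
theorem pvLoopA_reverse (k : Nat) (r acc : List Int) :
    pvLoopA k r.reverse acc = acc ++ r.take k := by
  induction k generalizing r acc with
  | zero => simp [pvLoopA]
  | succ k ih =>
    cases r with
    | nil => simp [pvLoopA, PySem.List.pop?]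
    | cons v t =>
      rw [List.reverse_cons]
      simp only [pvLoopA, PySem.List.pop?_last]
      rw [ih t (acc ++ [v])]
      simp

-- B's loop, read on the reversed remaining stack: a fold of the running-best step over the first k elements.
theorem pvLoopB_reverse (k : Nat) (r : List Int) (wm : Bool) (best : Int) :
    pvLoopB k r.reverse wm best =
      (r.take k).foldl (fun b v => if (if wm then b < v else v < b) then v else b) best := by
  induction k generalizing r best with
  | zero => simp [pvLoopB]
  | succ k ih =>
    cases r with
    | nil => simp [pvLoopB, PySem.List.pop?]
    | cons v t =>
      rw [List.reverse_cons]
      simp only [pvLoopB, PySem.List.pop?_last]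
      rw [ih t]
      simp

theorem step_eq_max (b v : Int) : (if b < v then v else b) = max b v := by
  split <;> omega

theorem step_eq_min (b v : Int) : (if v < b then v else b) = min b v := by
  split <;> omega

-- ===== VERDICT (by name: the statement is the Claim_ definition above) =====
theorem minmaxN_spec : Claim_equal_minmaxN := by
  intro stack wantMax _ hpre
  obtain ⟨hne, hN1, hNlen⟩ := hpre
  -- decompose stack = dropLast ++ [N], and the remaining part as r.reverse
  obtain ⟨init, N, hstack⟩ : ∃ init N, stack = init ++ [N] :=
    ⟨stack.dropLast, stack.getLast hne, (List.dropLast_append_getLast hne).symm⟩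
  subst hstack
  have hNval : (init ++ [N]).getLastD 0 = N := by simp
  rw [hNval] at hN1 hNlen
  have hlen : (N : Int) ≤ (init.length : Int) := by simpa using hNlen
  obtain ⟨r, hr⟩ : ∃ r : List Int, init = r.reverse := ⟨init.reverse, by simp⟩
  subst hr
  -- r is non-empty since 1 ≤ N ≤ len init
  cases r with
  | nil => simp at hlen; omega
  | cons v t =>
    unfold Spec_minmaxN minmaxN minmaxN_alt
    rw [List.reverse_cons]
    simp only [PySem.List.pop?_last]
    have htk : pvLoopA N.toNat (t.reverse ++ [v]) [] = (v :: t).take N.toNat := by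
      have h := pvLoopA_reverse N.toNat (v :: t) []
      rwa [List.reverse_cons, List.nil_append] at h
    have htake : (v :: t).take N.toNat = v :: t.take (N.toNat - 1) := by
      obtain ⟨m, hm⟩ : ∃ m, N.toNat = m + 1 := ⟨N.toNat - 1, by omega⟩
      rw [hm]
      simp
    have hB : pvLoopB (N - 1).toNat t.reverse wantMax v =
        (t.take (N.toNat - 1)).foldl
          (fun b v => if (if wantMax then b < v else v < b) then v else b) v := by
      rw [pvLoopB_reverse, show (N - 1).toNat = N.toNat - 1 from by omega]
    rw [htk, htake, hB]
    cases wantMax with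
    | true => simp [PySem.List.max?_id_cons, step_eq_max]
    | false => simp [PySem.List.min?_id_cons, step_eq_min]
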